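-- pv_equiv track=rewrite | github.com/umitkablan/sudokist.py | logic.py | _get_unique_probable_in_line_at_i
-- ===== SOURCE A (Python) =====
-- def _get_columns_same_set_in_size_n(set_lst, n_size):
--     selecteds = []
--     for i in range(0, len(set_lst) - n_size + 1):
--         if len(set_lst[i]) != n_size:
--             continue
--         selecteds.append(set_lst[i])
--         for j in range(i + 1, len(set_lst)):
--             if selecteds[0] == set_lst[j]:
--                 selecteds.append(set_lst[j])
--                 if len(selecteds) == n_size:
--                     return selecteds[0]
--         selecteds = []
--     return None
--
-- def _get_unique_probable_in_line_at_i(pll, i):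
--     ret = None
--     set_i = set(pll[i])
--     rest = [set(l) for l in pll[:i] + pll[i + 1:] if len(l) > 0]
--     for n_size in range(2, len(set_i) + 1):
--         set0 = _get_columns_same_set_in_size_n(rest, n_size)
--         if set0:
--             set_diff = set_i.difference(set0)
--             if len(set_diff) == 1:
--                 ret = set_diff.pop()
--                 break
--     return ret
-- ===== SOURCE B (Python) =====
-- def _get_unique_probable_in_line_at_i(pll, i):
--     set_i = set(pll[i])
--     # one pass: group the nonempty rest-lines by their value set, counting occurrences,
--     # in first-appearance order (dict insertion order)
--     groups = {}
--     for l in pll[:i] + pll[i + 1:]: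
--         if l:
--             fs = frozenset(l)
--             groups[fs] = groups.get(fs, 0) + 1
--     for n_size in range(2, len(set_i) + 1):
--         for fs, cnt in groups.items():
--             if len(fs) == n_size and cnt >= n_size:
--                 diff = set_i - fs
--                 if len(diff) == 1:
--                     return next(iter(diff))
--                 break
--     return None
-- ===== Notes on version B (the rewrite author's own statement) =====
-- stated objective: simpler
-- what changed: Replaces the quadratic nested-rescan helper (for each subset size, re-scan the rest lines and for each candidate re-scan the tail counting equal sets) by one grouping pass that builds an insertion-ordered dict of value-set -> occurrence count, after which each subset size is answered by picking the first group of that size with count >= size.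
import Mathlib
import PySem

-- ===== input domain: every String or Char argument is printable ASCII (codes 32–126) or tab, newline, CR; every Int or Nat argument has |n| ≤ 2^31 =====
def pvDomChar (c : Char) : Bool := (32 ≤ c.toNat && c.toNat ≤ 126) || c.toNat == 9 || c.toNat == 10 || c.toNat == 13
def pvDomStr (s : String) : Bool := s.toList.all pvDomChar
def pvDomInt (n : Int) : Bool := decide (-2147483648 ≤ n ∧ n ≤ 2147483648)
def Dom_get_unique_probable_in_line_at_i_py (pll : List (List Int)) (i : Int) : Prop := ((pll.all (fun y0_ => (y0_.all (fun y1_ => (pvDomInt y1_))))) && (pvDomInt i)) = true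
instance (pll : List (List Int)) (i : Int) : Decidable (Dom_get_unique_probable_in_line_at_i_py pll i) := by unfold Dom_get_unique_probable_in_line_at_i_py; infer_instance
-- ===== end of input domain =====

-- B replaces A's nested-rescan subset search by one grouping pass (ordered set->count table) + per-size lookup; same results, simpler structure.

-- ===== PORT A =====
-- inner loop 'for j in range(i + 1, len(set_lst)): …' of _get_columns_same_set_in_size_n
def pvA_inner (set_lst : List (PySem.Set Int)) (n_size : Int)
    (selecteds : List (PySem.Set Int)) : List Int → Option (PySem.Set Int)
  | [] => none
  | j :: js =>
    let sj := PySem.List.pyGetD set_lst j []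
    if PySem.Set.equal (PySem.List.pyGetD selecteds 0 []) sj then
      let selecteds' := selecteds ++ [sj]
      if (selecteds'.length : Int) = n_size then some (PySem.List.pyGetD selecteds' 0 [])
      else pvA_inner set_lst n_size selecteds' js
    else pvA_inner set_lst n_size selecteds js

-- outer loop 'for i in range(0, len(set_lst) - n_size + 1): …' ('selecteds = []' then re-seeded each round)
def pvA_outer (set_lst : List (PySem.Set Int)) (n_size : Int) : List Int → Option (PySem.Set Int)
  | [] => none
  | i :: is_ =>
    let si := PySem.List.pyGetD set_lst i []
    if (PySem.Set.len si : Int) ≠ n_size then pvA_outer set_lst n_size is_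
    else
      match pvA_inner set_lst n_size [si] (PySem.List.pyRange (i + 1) (set_lst.length : Int) 1) with
      | some r => some r
      | none => pvA_outer set_lst n_size is_

def pvA_get_columns_same_set_in_size_n (set_lst : List (PySem.Set Int)) (n_size : Int) :
    Option (PySem.Set Int) :=
  pvA_outer set_lst n_size (PySem.List.pyRange 0 ((set_lst.length : Int) - n_size + 1) 1)

-- 'for n_size in range(2, len(set_i) + 1): …'
def pvA_loop (set_i : PySem.Set Int) (rest : List (PySem.Set Int)) : List Int → Option Int
  | [] => none
  | n :: ns =>
    match pvA_get_columns_same_set_in_size_n rest n with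
    | some set0 =>
      if set0.length ≠ 0 then   -- Python truthiness 'if set0:'
        let set_diff := PySem.Set.diff set_i set0
        if set_diff.len = 1 then some (PySem.List.pyGetD set_diff 0 0)  -- set.pop() on a singleton set
        else pvA_loop set_i rest ns
      else pvA_loop set_i rest ns
    | none => pvA_loop set_i rest ns

def get_unique_probable_in_line_at_i_py (pll : List (List Int)) (i : Int) : Option Int :=
  match PySem.List.pyGet? pll i with
  | none => none   -- IndexError on pll[i]; excluded by Pre_
  | some li =>
    let set_i := PySem.Set.ofList li
    let rest := ((PySem.List.slice pll none (some i) ++ PySem.List.slice pll (some (i + 1)) none).filter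
        (fun l => 0 < l.length)).map (fun l => PySem.Set.ofList l)
    pvA_loop set_i rest (PySem.List.pyRange 2 (set_i.len + 1) 1)

-- ===== PORT B =====
-- the groups dict keyed by frozensets: an insertion-ordered association list whose keys are
-- compared as sets (Set.equal), exactly how Python's dict compares frozenset keys (hand-ported)
def pvB_bump : List (PySem.Set Int × Int) → PySem.Set Int → List (PySem.Set Int × Int)
  | [], s => [(s, 1)]
  | (k, c) :: g, s => if PySem.Set.equal k s then (k, c + 1) :: g else (k, c) :: pvB_bump g s

-- 'for l in pll[:i] + pll[i+1:]: if l: groups[frozenset(l)] = groups.get(frozenset(l), 0) + 1'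
def pvB_groups (lines : List (List Int)) : List (PySem.Set Int × Int) :=
  lines.foldl (fun g l => if l.isEmpty then g else pvB_bump g (PySem.Set.ofList l)) []

-- 'for n_size in …: for fs, cnt in groups.items(): if …: (return / break)'
def pvB_loop (set_i : PySem.Set Int) (groups : List (PySem.Set Int × Int)) : List Int → Option Int
  | [] => none
  | n :: ns =>
    match groups.find? (fun kc => (kc.1.len == n) && (n ≤ kc.2 : Bool)) with
    | some kc =>
      let diff := PySem.Set.diff set_i kc.1
      if diff.len = 1 then some (PySem.List.pyGetD diff 0 0)  -- next(iter(diff)) on a singleton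
      else pvB_loop set_i groups ns                           -- 'break', next n_size
    | none => pvB_loop set_i groups ns

def get_unique_probable_in_line_at_i_py_alt (pll : List (List Int)) (i : Int) : Option Int :=
  match PySem.List.pyGet? pll i with
  | none => none
  | some li =>
    let set_i := PySem.Set.ofList li
    let groups := pvB_groups (PySem.List.slice pll none (some i) ++ PySem.List.slice pll (some (i + 1)) none)
    pvB_loop set_i groups (PySem.List.pyRange 2 (set_i.len + 1) 1)

-- ===== PRECONDITION & SPEC =====
-- Pre_: pll[i] must not raise IndexError, i.e. -len(pll) ≤ i < len(pll); nothing else is excluded.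
def Pre_get_unique_probable_in_line_at_i_py (pll : List (List Int)) (i : Int) : Prop :=
  PySem.Raise.InRange pll.length i
instance (pll : List (List Int)) (i : Int) : Decidable (Pre_get_unique_probable_in_line_at_i_py pll i) := by
  unfold Pre_get_unique_probable_in_line_at_i_py; infer_instance

def pvWitness_get_unique_probable_in_line_at_i_py : List (List Int) × Int :=
  ([[1, 2, 9], [1, 2], [1, 2], [3]], 0)

def Spec_get_unique_probable_in_line_at_i_py (pll : List (List Int)) (i : Int) (out : Option Int) : Prop := out = get_unique_probable_in_line_at_i_py_alt pll i
instance (pll : List (List Int)) (i : Int) (out : Option Int) : Decidable (Spec_get_unique_probable_in_line_at_i_py pll i out) := by unfold Spec_get_unique_probable_in_line_at_i_py; infer_instance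

-- ===== CLAIM (what is proved, stated in full; the proofs are below) =====
def Claim_equal_get_unique_probable_in_line_at_i_py : Prop := ∀ (pll : List (List Int)) (i : Int), Dom_get_unique_probable_in_line_at_i_py pll i → Pre_get_unique_probable_in_line_at_i_py pll i → Spec_get_unique_probable_in_line_at_i_py pll i (get_unique_probable_in_line_at_i_py pll i)

-- ===== LEMMAS AND PROOFS =====

-- count, in ss, of sets equal (as sets) to s
def pvCnt (ss : List (PySem.Set Int)) (s : PySem.Set Int) : Nat :=
  ss.countP (fun t => PySem.Set.equal s t)

-- "first naked subset" predicate both sides are reduced to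
def pvPred (ss : List (PySem.Set Int)) (n : Int) (s : PySem.Set Int) : Bool :=
  (s.len == n) && (n ≤ (pvCnt ss s : Int) : Bool)

-- the length/count condition A's outer loop tests at Nat index k, phrased structurally
def pvCondN (ss : List (PySem.Set Int)) (n : Int) (k : Nat) : Bool :=
  ((ss.getD k []).len == n) &&
    (n ≤ 1 + ((ss.drop (k + 1)).countP (fun t => PySem.Set.equal (ss.getD k []) t) : Int) : Bool)

-- ss has pairwise-equal-implies-equal-length (holds for lists of genuine sets)
def pvHlen (ss : List (PySem.Set Int)) : Prop :=
  ∀ s ∈ ss, ∀ t ∈ ss, PySem.Set.equal s t = true → s.length = t.length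

theorem pvEqual_refl (s : PySem.Set Int) : PySem.Set.equal s s = true := by
  rw [PySem.Set.equal_iff]; intro x; rfl

theorem pvEqual_symm {s t : PySem.Set Int} (h : PySem.Set.equal s t = true) :
    PySem.Set.equal t s = true := by
  rw [PySem.Set.equal_iff] at *; intro x; exact (h x).symm

theorem pvEqual_trans {s t u : PySem.Set Int} (h1 : PySem.Set.equal s t = true)
    (h2 : PySem.Set.equal t u = true) : PySem.Set.equal s u = true := by
  rw [PySem.Set.equal_iff] at *; intro x; exact (h1 x).trans (h2 x)

theorem pvCnt_congr (l : List (PySem.Set Int)) {s t : PySem.Set Int}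
    (h : PySem.Set.equal s t = true) : pvCnt l s = pvCnt l t := by
  unfold pvCnt
  refine List.countP_congr (fun u _ => ?_)
  constructor
  · exact fun hs => pvEqual_trans (pvEqual_symm h) hs
  · exact fun ht => pvEqual_trans h ht

theorem pvCnt_cons (s t : PySem.Set Int) (l : List (PySem.Set Int)) :
    pvCnt (t :: l) s = pvCnt l s + (if PySem.Set.equal s t then 1 else 0) := by
  unfold pvCnt
  simp [List.countP_cons]

theorem pvCnt_le_length (l : List (PySem.Set Int)) (s : PySem.Set Int) :
    pvCnt l s ≤ l.length := List.countP_le_length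

-- generic find? congruence
theorem pvFind_congr {α : Type} (l : List α) (p q : α → Bool)
    (h : ∀ t ∈ l, p t = q t) : l.find? p = l.find? q := by
  induction l with
  | nil => rfl
  | cons a l ih =>
    simp only [List.find?_cons]
    rw [h a (by simp)]
    cases q a <;> simp [ih (fun t ht => h t (by simp [ht]))]

-- generic: find? over a filter when the removed elements never satisfy the predicate
theorem pvFind_filter {α : Type} (l : List α) (p q r : α → Bool)
    (h1 : ∀ t ∈ l, r t = true → p t = false)
    (h2 : ∀ t ∈ l, r t = false → p t = q t) :
    l.find? p = (l.filter (fun t => !r t)).find? q := by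
  induction l with
  | nil => rfl
  | cons a l ih =>
    by_cases hr : r a = true
    · rw [List.find?_cons, h1 a (by simp) hr]
      simp only [List.filter_cons, hr]
      exact ih (fun t ht => h1 t (by simp [ht])) (fun t ht => h2 t (by simp [ht]))
    · replace hr : r a = false := by revert hr; cases r a <;> simp
      have hpq := h2 a (by simp) hr
      simp only [List.find?_cons, List.filter_cons, hr, Bool.not_false, if_true]
      rw [hpq]
      cases hq : q a
      · simp only []
        exact ih (fun t ht => h1 t (by simp [ht])) (fun t ht => h2 t (by simp [ht]))
      · simp

-- ---- B side: the groups table ----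

theorem pvB_headclass (ss : List (PySem.Set Int)) :
    ∀ (s : PySem.Set Int) (c : Int) (g : List (PySem.Set Int × Int)),
    ss.foldl pvB_bump ((s, c) :: g) =
      (s, c + (pvCnt ss s : Int)) ::
        (ss.filter (fun t => !PySem.Set.equal s t)).foldl pvB_bump g := by
  induction ss with
  | nil => intro s c g; simp [pvCnt]
  | cons t ss ih =>
    intro s c g
    by_cases h : PySem.Set.equal s t = true
    · have hb : pvB_bump ((s, c) :: g) t = (s, c + 1) :: g := by simp [pvB_bump, h]
      simp only [List.foldl_cons, hb, ih, List.filter_cons, h, pvCnt_cons]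
      simp
      ring
    · have hb : pvB_bump ((s, c) :: g) t = (s, c) :: pvB_bump g t := by simp [pvB_bump, h]
      simp only [List.foldl_cons, hb, ih, List.filter_cons, pvCnt_cons]
      simp [h]

theorem pvB_groups_cons (s : PySem.Set Int) (ss : List (PySem.Set Int)) :
    (s :: ss).foldl pvB_bump [] =
      (s, 1 + (pvCnt ss s : Int)) :: (ss.filter (fun t => !PySem.Set.equal s t)).foldl pvB_bump [] := by
  simpa using pvB_headclass ss s 1 ([])

-- B's per-size lookup in the groups table is the first-naked-subset find? over ss
-- a failing head predicate fails on its whole equal-class, and off-class counts ignore the class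
theorem pvPred_cons_eq (n : Int) (s t : PySem.Set Int) (ss' : List (PySem.Set Int))
    (ht : ¬ PySem.Set.equal s t = true) :
    pvPred (s :: ss') n t = pvPred (ss'.filter (fun u => !PySem.Set.equal s u)) n t := by
  have hcnt : pvCnt (s :: ss') t = pvCnt (ss'.filter (fun u => !PySem.Set.equal s u)) t := by
    rw [pvCnt_cons]
    have hts : ¬ PySem.Set.equal t s = true := fun h => ht (pvEqual_symm h)
    simp only [hts]
    unfold pvCnt
    rw [List.countP_filter]
    refine (List.countP_congr (fun u _ => ?_)).symm
    constructor
    · intro h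
      rcases Bool.and_eq_true_iff.mp h with ⟨h1, _⟩
      exact h1
    · intro h
      refine Bool.and_eq_true_iff.mpr ⟨h, ?_⟩
      by_contra hsu
      replace hsu : PySem.Set.equal s u = true := by
        revert hsu; cases PySem.Set.equal s u <;> simp
      exact ht (pvEqual_trans hsu (pvEqual_symm h))
  unfold pvPred
  rw [hcnt]

theorem pvPred_class_false (n : Int) (s t : PySem.Set Int) (ss : List (PySem.Set Int))
    (hmem_s : s ∈ ss) (hmem_t : t ∈ ss) (hl : pvHlen ss)
    (ht : PySem.Set.equal s t = true) (hp : pvPred ss n s = false) :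
    pvPred ss n t = false := by
  have hlen : s.length = t.length := hl s hmem_s t hmem_t ht
  have hcnt : pvCnt ss s = pvCnt ss t := pvCnt_congr ss ht
  unfold pvPred at *
  rw [PySem.Set.len_eq] at *
  rw [← hlen, ← hcnt]
  exact hp

theorem pvHlen_sub {ss ss' : List (PySem.Set Int)} (h : ∀ x ∈ ss', x ∈ ss)
    (hl : pvHlen ss) : pvHlen ss' :=
  fun s hs t ht he => hl s (h s hs) t (h t ht) he

theorem pvB_find_aux (n : Int) : ∀ (N : Nat) (ss : List (PySem.Set Int)), ss.length ≤ N →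
    pvHlen ss →
    ((ss.foldl pvB_bump []).find? (fun kc => (kc.1.len == n) && (n ≤ kc.2 : Bool))).map Prod.fst =
      ss.find? (pvPred ss n) := by
  intro N
  induction N with
  | zero =>
    intro ss hlen _
    have : ss = [] := List.eq_nil_of_length_eq_zero (Nat.le_zero.mp hlen)
    subst this; rfl
  | succ N ih =>
    intro ss hlen hl
    match ss with
    | [] => rfl
    | s :: ss' =>
      rw [pvB_groups_cons]
      have hcnt0 : (1 + (pvCnt ss' s : Int)) = (pvCnt (s :: ss') s : Int) := by
        rw [pvCnt_cons, if_pos (pvEqual_refl s)]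
        push_cast; ring
      have hhead : ((s.len == n) && (n ≤ 1 + (pvCnt ss' s : Int) : Bool)) = pvPred (s :: ss') n s := by
        simp only [pvPred, hcnt0]
      rw [List.find?_cons, List.find?_cons]
      simp only [hhead]
      cases hp : pvPred (s :: ss') n s with
      | true => rfl
      | false =>
        set flt := ss'.filter (fun u => !PySem.Set.equal s u) with hflt
        have hsub : ∀ x ∈ flt, x ∈ s :: ss' := by
          intro x hx; exact List.mem_cons_of_mem s (List.mem_of_mem_filter hx)
        have hlen' : flt.length ≤ N := le_trans (List.length_filter_le _ _) (by
          have := hlen; simp at this; omega)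
        rw [ih flt hlen' (pvHlen_sub hsub hl)]
        refine (pvFind_filter ss' (pvPred (s :: ss') n) (pvPred flt n)
          (fun t => PySem.Set.equal s t) ?_ ?_).symm
        · intro t htm hst
          exact pvPred_class_false n s t (s :: ss') (by simp) (by simp [htm]) hl hst hp
        · intro t htm hst
          have hst' : PySem.Set.equal s t = false := hst
          exact pvPred_cons_eq n s t ss' (by rw [hst']; simp)

theorem pvB_find (n : Int) (ss : List (PySem.Set Int)) (hl : pvHlen ss) :
    ((ss.foldl pvB_bump []).find? (fun kc => (kc.1.len == n) && (n ≤ kc.2 : Bool))).map Prod.fst =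
      ss.find? (pvPred ss n) :=
  pvB_find_aux n ss.length ss le_rfl hl

-- ---- A side ----

theorem pvRange_nil {a b : Int} (h : b ≤ a) : PySem.List.pyRange a b 1 = [] := by
  simp [PySem.List.pyRange]; omega

theorem pvA_inner_char (ss : List (PySem.Set Int)) (n : Int) :
    ∀ (js : List Int) (sel : List (PySem.Set Int)), sel ≠ [] → (sel.length : Int) < n →
    pvA_inner ss n sel js =
      if n ≤ (sel.length : Int) +
          ((js.countP (fun j => PySem.Set.equal (PySem.List.pyGetD sel 0 []) (PySem.List.pyGetD ss j []))) : Int)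
      then some (PySem.List.pyGetD sel 0 []) else none := by
  intro js
  induction js with
  | nil =>
    intro sel _ hlt
    rw [if_neg (by simp only [List.countP_nil]; omega)]
    rfl
  | cons j js ih =>
    intro sel hne hlt
    obtain ⟨a, l, rfl⟩ : ∃ a l, sel = a :: l := by
      cases sel with
      | nil => exact absurd rfl hne
      | cons a l => exact ⟨a, l, rfl⟩
    simp only [pvA_inner, List.countP_cons, PySem.List.pyGetD_zero_cons]
    by_cases hm : PySem.Set.equal a (PySem.List.pyGetD ss j []) = true
    · have hsel' : (a :: l) ++ [PySem.List.pyGetD ss j []] = a :: (l ++ [PySem.List.pyGetD ss j []]) := rfl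
      have hLf : ((a :: l).length : Int) = (l.length : Int) + 1 := by push_cast [List.length_cons]; ring
      have hLa : ((a :: (l ++ [PySem.List.pyGetD ss j []])).length : Int) = (l.length : Int) + 2 := by
        push_cast [List.length_cons, List.length_append, List.length_nil]; ring
      by_cases hfull : ((a :: l).length + 1 : Int) = n
      · rw [if_pos hm, hsel']
        simp only [PySem.List.pyGetD_zero_cons]
        rw [if_pos (by rw [hLa]; rw [hLf] at hfull; omega)]
        rw [if_pos (by rw [hm]; simp only [if_true]; rw [hLf] at hfull ⊢; push_cast; omega)]
      · rw [if_pos hm, hsel']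
        rw [if_neg (by rw [hLa]; rw [hLf] at hfull; omega)]
        rw [ih (a :: (l ++ [PySem.List.pyGetD ss j []])) (by simp) (by
          rw [hLa]; rw [hLf] at hfull hlt; omega)]
        simp only [PySem.List.pyGetD_zero_cons]
        rw [hm]
        simp only [if_true]
        refine if_congr ?_ rfl rfl
        rw [hLa, hLf]
        push_cast
        omega
    · have hmf : PySem.Set.equal a (PySem.List.pyGetD ss j []) = false := by
        revert hm; cases PySem.Set.equal a (PySem.List.pyGetD ss j []) <;> simp
      rw [if_neg hm]
      rw [ih (a :: l) hne hlt]
      simp only [PySem.List.pyGetD_zero_cons]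
      rw [hmf]
      simp

theorem pvA_outer_char (ss : List (PySem.Set Int)) (n : Int) (hn : 2 ≤ n) :
    ∀ (is_ : List Int),
    pvA_outer ss n is_ =
      (is_.find? (fun i => ((PySem.List.pyGetD ss i []).len == n) &&
        (n ≤ 1 + ((PySem.List.pyRange (i + 1) (ss.length : Int) 1).countP
            (fun j => PySem.Set.equal (PySem.List.pyGetD ss i []) (PySem.List.pyGetD ss j [])) : Int) : Bool))).map
        (fun i => PySem.List.pyGetD ss i []) := by
  intro is_
  induction is_ with
  | nil => rfl
  | cons i is ih =>
    simp only [pvA_outer, List.find?_cons]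
    by_cases hL : (PySem.List.pyGetD ss i []).len ≠ n
    · rw [if_pos hL]
      have hb : ((PySem.List.pyGetD ss i []).len == n) = false := by
        simp only [beq_eq_false_iff_ne, ne_eq]; exact hL
      rw [hb]
      simp only [Bool.false_and]
      exact ih
    · rw [not_not] at hL
      rw [if_neg (not_not_intro hL)]
      have hb : ((PySem.List.pyGetD ss i []).len == n) = true := by rw [beq_iff_eq]; exact hL
      rw [hb]
      simp only [Bool.true_and]
      rw [pvA_inner_char ss n (PySem.List.pyRange (i + 1) (ss.length : Int) 1)
        [PySem.List.pyGetD ss i []] (by simp) (by simp; omega)]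
      simp only [PySem.List.pyGetD_zero_cons, List.length_cons, List.length_nil]
      cases hc : decide (n ≤ 1 + ((PySem.List.pyRange (i + 1) (ss.length : Int) 1).countP
          (fun j => PySem.Set.equal (PySem.List.pyGetD ss i []) (PySem.List.pyGetD ss j [])) : Int)) with
      | true =>
        rw [if_pos (by have := of_decide_eq_true hc; push_cast at this ⊢; omega)]
        rfl
      | false =>
        rw [if_neg (by have := of_decide_eq_false hc; push_cast at this ⊢; omega)]
        exact ih

-- counting matches over an index range is counting over the dropped suffix
theorem pvCount_range (ss : List (PySem.Set Int)) (p : PySem.Set Int → Bool) :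
    ∀ (a : Nat),
    (PySem.List.pyRange (a : Int) (ss.length : Int) 1).countP (fun j => p (PySem.List.pyGetD ss j [])) =
      (ss.drop a).countP p := by
  suffices H : ∀ (N a : Nat), ss.length ≤ a + N →
      (PySem.List.pyRange (a : Int) (ss.length : Int) 1).countP (fun j => p (PySem.List.pyGetD ss j [])) =
        (ss.drop a).countP p by
    intro a; exact H ss.length a (by omega)
  intro N
  induction N with
  | zero =>
    intro a ha
    rw [pvRange_nil (by exact_mod_cast (show ss.length ≤ a by omega))]
    rw [List.drop_eq_nil_of_le (by omega)]
    rfl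
  | succ N ih =>
    intro a ha
    by_cases hab : a < ss.length
    · rw [PySem.List.pyRange_one_cons (by exact_mod_cast hab)]
      rw [List.countP_cons]
      have h1 : ((a : Int) + 1) = ((a + 1 : Nat) : Int) := by push_cast; ring
      rw [h1, ih (a + 1) (by omega)]
      rw [List.drop_eq_getElem_cons hab, List.countP_cons]
      rw [PySem.List.pyGetD_natCast, List.getD_eq_getElem _ _ hab]
    · rw [pvRange_nil (by exact_mod_cast not_lt.mp hab)]
      rw [List.drop_eq_nil_of_le (by omega)]
      rfl

-- pvPred can only become true when the list grows
theorem pvPred_cons_mono (n : Int) (u t : PySem.Set Int) (ss : List (PySem.Set Int))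
    (h : pvPred ss n t = true) : pvPred (u :: ss) n t = true := by
  unfold pvPred at *
  rcases Bool.and_eq_true_iff.mp h with ⟨h1, h2⟩
  refine Bool.and_eq_true_iff.mpr ⟨h1, ?_⟩
  rw [decide_eq_true_eq] at h2 ⊢
  rw [pvCnt_cons]
  split_ifs <;> push_cast <;> omega

-- the crux: A's index scan computes the first-naked-subset find? (Nat-level statement)
theorem pvA_crux (n : Nat) (hn : 2 ≤ n) : ∀ (ss : List (PySem.Set Int)), pvHlen ss →
    ((List.range (ss.length + 1 - n)).find? (pvCondN ss (n : Int))).map (fun k => ss.getD k []) =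
      ss.find? (pvPred ss (n : Int)) := by
  intro ss
  induction ss with
  | nil =>
    intro _
    have h0 : ([] : List (PySem.Set Int)).length + 1 - n = 0 := by simp; omega
    rw [h0]; rfl
  | cons s ss ih =>
    intro hl
    by_cases hbig : ss.length + 2 ≤ n
    · have h0 : (s :: ss).length + 1 - n = 0 := by simp; omega
      rw [h0]
      refine (List.find?_eq_none.mpr ?_).symm
      intro t ht hcontra
      rcases Bool.and_eq_true_iff.mp hcontra with ⟨_, h2⟩
      rw [decide_eq_true_eq] at h2
      have := pvCnt_le_length (s :: ss) t
      simp only [List.length_cons] at this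
      omega
    · have hm : (s :: ss).length + 1 - n = (ss.length + 1 - n) + 1 := by simp; omega
      rw [hm, List.range_succ_eq_map, List.find?_cons, List.find?_cons]
      have hc0 : pvCondN (s :: ss) (n : Int) 0 = pvPred (s :: ss) (n : Int) s := by
        unfold pvCondN pvPred
        simp only [List.getD_cons_zero, List.drop_succ_cons, List.drop_zero]
        have : pvCnt (s :: ss) s = ss.countP (fun t => PySem.Set.equal s t) + 1 := by
          rw [pvCnt_cons, if_pos (pvEqual_refl s)]; rfl
        rw [this]
        congr 1
        rw [decide_eq_decide]
        push_cast
        omega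
      rw [hc0]
      cases hp : pvPred (s :: ss) (n : Int) s with
      | true => rfl
      | false =>
        rw [List.find?_map, Option.map_map]
        have hshift : (pvCondN (s :: ss) (n : Int)) ∘ Nat.succ = pvCondN ss (n : Int) := by
          funext k
          unfold pvCondN
          simp only [Function.comp_apply, Nat.succ_eq_add_one, List.getD_cons_succ,
            List.drop_succ_cons]
        have hmap : ((fun k => (s :: ss).getD k []) ∘ Nat.succ) = (fun k => ss.getD k []) := by
          funext k
          simp only [Function.comp_apply, Nat.succ_eq_add_one, List.getD_cons_succ]
        rw [hshift, hmap]
        rw [ih (pvHlen_sub (fun x hx => List.mem_cons_of_mem s hx) hl)]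
        refine pvFind_congr ss _ _ (fun t ht => ?_)
        by_cases hE : PySem.Set.equal s t = true
        · have h1 : pvPred (s :: ss) (n : Int) t = false :=
            pvPred_class_false (n : Int) s t (s :: ss) (by simp) (by simp [ht]) hl hE hp
          have h2 : pvPred ss (n : Int) t = false := by
            cases h : pvPred ss (n : Int) t with
            | false => rfl
            | true => rw [pvPred_cons_mono (n : Int) s t ss h] at h1; exact absurd h1 (by simp)
          rw [h1, h2]
        · unfold pvPred
          rw [pvCnt_cons, if_neg (fun h => hE (pvEqual_symm h))]
          simp

theorem pvA_get_char (ss : List (PySem.Set Int)) (n : Int) (hn : 2 ≤ n) (hl : pvHlen ss) :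
    pvA_get_columns_same_set_in_size_n ss n = ss.find? (pvPred ss n) := by
  unfold pvA_get_columns_same_set_in_size_n
  rw [pvA_outer_char ss n hn]
  by_cases hle : (ss.length : Int) - n + 1 ≤ 0
  · rw [pvRange_nil hle]
    refine (List.find?_eq_none.mpr ?_).symm
    intro t ht hcontra
    rcases Bool.and_eq_true_iff.mp hcontra with ⟨_, h2⟩
    rw [decide_eq_true_eq] at h2
    have h3 := pvCnt_le_length ss t
    omega
  · rw [not_le] at hle
    obtain ⟨m, hm⟩ : ∃ m : Nat, (ss.length : Int) - n + 1 = (m : Int) :=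
      ⟨((ss.length : Int) - n + 1).toNat, by omega⟩
    rw [hm, PySem.List.pyRange_zero_natCast, List.find?_map, Option.map_map]
    have hcond : ((fun i : Int => ((PySem.List.pyGetD ss i []).len == n) &&
        (n ≤ 1 + ((PySem.List.pyRange (i + 1) (ss.length : Int) 1).countP
          (fun j => PySem.Set.equal (PySem.List.pyGetD ss i []) (PySem.List.pyGetD ss j [])) : Int) : Bool)) ∘
        (fun k : Nat => (k : Int))) = pvCondN ss n := by
      funext k
      simp only [Function.comp_apply, PySem.List.pyGetD_natCast]
      unfold pvCondN
      have h1 : ((k : Int) + 1) = ((k + 1 : Nat) : Int) := by push_cast; ring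
      rw [h1, pvCount_range ss _ (k + 1)]
    have hmap : ((fun i : Int => PySem.List.pyGetD ss i []) ∘ (fun k : Nat => (k : Int))) =
        (fun k : Nat => ss.getD k []) := by
      funext k
      simp only [Function.comp_apply, PySem.List.pyGetD_natCast]
    rw [hcond, hmap]
    have hnt : n = ((n.toNat : Nat) : Int) := by omega
    have hmval : m = ss.length + 1 - n.toNat := by omega
    rw [hmval, hnt]
    exact pvA_crux n.toNat (by omega) ss hl

-- per-size agreement chained over the n_size loop
theorem pvLoop_eq (set_i : PySem.Set Int) (ss : List (PySem.Set Int)) (hl : pvHlen ss) :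
    ∀ (ns : List Int), (∀ n ∈ ns, 2 ≤ n) →
    pvA_loop set_i ss ns = pvB_loop set_i (ss.foldl pvB_bump []) ns := by
  intro ns
  induction ns with
  | nil => intro _; rfl
  | cons n ns ih =>
    intro hns
    have hn2 : 2 ≤ n := hns n (by simp)
    have hA : pvA_get_columns_same_set_in_size_n ss n = ss.find? (pvPred ss n) :=
      pvA_get_char ss n hn2 hl
    have hB := pvB_find n ss hl
    have hih := ih (fun x hx => hns x (by simp [hx]))
    simp only [pvA_loop, pvB_loop]
    cases hf : ss.find? (pvPred ss n) with
    | none =>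
      rw [hf] at hA hB
      rw [hA]
      have hBnone : (ss.foldl pvB_bump []).find?
          (fun kc => (kc.1.len == n) && (n ≤ kc.2 : Bool)) = none := by
        cases h : (ss.foldl pvB_bump []).find? (fun kc => (kc.1.len == n) && (n ≤ kc.2 : Bool)) with
        | none => rfl
        | some kc => rw [h] at hB; simp at hB
      rw [hBnone]
      dsimp only
      exact hih
    | some s =>
      rw [hf] at hA hB
      rw [hA]
      cases h : (ss.foldl pvB_bump []).find? (fun kc => (kc.1.len == n) && (n ≤ kc.2 : Bool)) with
      | none => rw [h] at hB; simp at hB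
      | some kc =>
        rw [h] at hB
        have hkc : kc.1 = s := by simpa using hB
        have hps : pvPred ss n s = true := List.find?_some hf
        have hlen : s.len = n := by
          rcases Bool.and_eq_true_iff.mp hps with ⟨h1, _⟩
          exact beq_iff_eq.mp h1
        have hne0 : s.length ≠ 0 := by
          rw [PySem.Set.len_eq] at hlen
          omega
        dsimp only
        rw [if_pos hne0, hkc]
        by_cases hd : (PySem.Set.diff set_i s).len = 1
        · rw [if_pos hd, if_pos hd]
        · rw [if_neg hd, if_neg hd]; exact hih

-- B groups over the raw line list = groups over A's filtered-and-set-ified rest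
theorem pvGroups_eq (lines : List (List Int)) :
    pvB_groups lines =
      ((lines.filter (fun l => 0 < l.length)).map (fun l => PySem.Set.ofList l)).foldl pvB_bump [] := by
  unfold pvB_groups
  rw [List.foldl_map, List.foldl_filter]
  congr 1
  funext g l
  cases l <;> simp

theorem pvHlen_ofList_map (ls : List (List Int)) :
    pvHlen (ls.map (fun l => PySem.Set.ofList l)) := by
  intro s hs t ht he
  rcases List.mem_map.mp hs with ⟨as, _, rfl⟩
  rcases List.mem_map.mp ht with ⟨bs, _, rfl⟩
  have hperm : (PySem.Set.ofList as).Perm (PySem.Set.ofList bs) :=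
    (List.perm_ext_iff_of_nodup (PySem.Set.nodup_ofList as) (PySem.Set.nodup_ofList bs)).mpr
      ((PySem.Set.equal_iff _ _).mp he)
  exact hperm.length_eq

-- ===== VERDICT (by name: the statement is the Claim_ definition above) =====
theorem get_unique_probable_in_line_at_i_py_spec : Claim_equal_get_unique_probable_in_line_at_i_py := by
  intro pll i _ hpre
  unfold Pre_get_unique_probable_in_line_at_i_py at hpre
  unfold Spec_get_unique_probable_in_line_at_i_py
  unfold get_unique_probable_in_line_at_i_py get_unique_probable_in_line_at_i_py_alt
  cases hget : PySem.List.pyGet? pll i with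
  | none => exact absurd hpre ((PySem.List.pyGet?_eq_none_iff pll i).mp hget)
  | some li =>
    simp only []
    rw [pvGroups_eq]
    exact (pvLoop_eq (PySem.Set.ofList li) _
      (pvHlen_ofList_map _) _
      (fun n hn => (PySem.List.mem_pyRange_one.mp hn).1)).symm ▸ rfl
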